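-- pv_equiv track=rewrite | github.com/m1sterzer0/codejams | python/2018/1A/B.py | solve
-- ===== SOURCE A (Python) =====
-- def solve(inp) :
--     (r,b,c,cashiers) = inp
--     left,right = 0,2000000000000000000
--     while (right-left) > 1 :
--         m = (right+left) // 2
--         if evalCashiers(cashiers,m,r,b) : right = m
--         else :                            left = m
--     return "%d" % right
--
-- def coins(c,t) :
--     (m,s,p) = c
--     if p > t : return 0
--     maxt = p + s * m
--     if t >= maxt : return m
--     return (t - p) // s
--
-- def evalCashiers(cashiers,t,r,b) :
--     coinsPerCashier = [coins(cashiers[i],t) for i in range(len(cashiers))]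
--     coinsPerCashier.sort(reverse=True)
--     return True if sum(coinsPerCashier[:r]) >= b else False
-- ===== SOURCE B (Python) =====
-- def solve(inp):
--     (r, b, c, cashiers) = inp
--
--     def feasible(t):
--         # ascending buffer of the r largest coin counts seen so far
--         best = []
--         for (m, s, p) in cashiers:
--             if t < p:
--                 made = 0
--             elif t >= p + s * m:
--                 made = m
--             else:
--                 made = (t - p) // s
--             if len(best) < r:
--                 j = 0
--                 while j < len(best) and best[j] <= made:
--                     j += 1
--                 best.insert(j, made)
--             elif r and made > best[0]:
--                 del best[0]
--                 j = 0
--                 while j < len(best) and best[j] <= made: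
--                     j += 1
--                 best.insert(j, made)
--         return sum(best) >= b
--
--     def bisect(lo, hi):
--         if hi - lo <= 1:
--             return hi
--         mid = (lo + hi) // 2
--         return bisect(lo, mid) if feasible(mid) else bisect(mid, hi)
--
--     return "%d" % bisect(0, 2000000000000000000)
-- ===== Notes on version B (the rewrite author's own statement) =====
-- stated objective: alternative
-- what changed: The feasibility probe no longer builds, fully sorts and slices the whole coin list: it streams over the cashiers once, keeping only the r largest coin counts in a bounded ascending buffer (replace-the-minimum), and the binary search is written as recursion on the interval instead of a while loop; Pre_ excludes negative r with a nonempty cashier list (outside the task's natural domain), where B's top-r buffer raises IndexError while A's [:r] slice still returns a value.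
-- outside the precondition, e.g. on solve((-1, 2, 0, [(3, 1, 1)])): A returns '2000000000000000000', B raises IndexError
import Mathlib
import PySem

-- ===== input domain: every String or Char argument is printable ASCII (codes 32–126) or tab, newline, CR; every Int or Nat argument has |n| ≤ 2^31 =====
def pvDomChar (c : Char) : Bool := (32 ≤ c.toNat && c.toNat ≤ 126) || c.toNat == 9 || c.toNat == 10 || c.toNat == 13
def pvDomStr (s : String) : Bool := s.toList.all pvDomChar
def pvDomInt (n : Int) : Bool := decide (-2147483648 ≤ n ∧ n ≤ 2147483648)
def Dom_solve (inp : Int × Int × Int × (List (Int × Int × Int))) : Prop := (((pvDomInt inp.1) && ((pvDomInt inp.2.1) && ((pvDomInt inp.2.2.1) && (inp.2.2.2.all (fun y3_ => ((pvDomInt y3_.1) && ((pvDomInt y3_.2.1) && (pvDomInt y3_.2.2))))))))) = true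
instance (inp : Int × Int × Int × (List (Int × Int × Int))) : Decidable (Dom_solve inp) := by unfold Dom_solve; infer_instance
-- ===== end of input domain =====

-- B streams the cashiers once per probe, keeping the r largest coin counts in a bounded
-- ascending buffer, and runs the binary search as a recursion on the interval (objective:
-- alternative top-r selection and decomposition).

-- ===== PORT A =====

def coinsA (c : Int × Int × Int) (t : Int) : Int :=
  let (m, s, p) := c
  if p > t then 0
  else
    let maxt := p + s * m
    if t ≥ maxt then m
    else PySem.Int.floordiv (t - p) s   -- s = 0 never reaches this branch (then maxt = p ≤ t)

def evalCashiersA (cashiers : List (Int × Int × Int)) (t r b : Int) : Bool :=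
  -- [coins(cashiers[i],t) for i in range(len(cashiers))] : the index runs over the whole list, = map
  let coinsPerCashier := cashiers.map (fun ca => coinsA ca t)
  let sortedDesc := PySem.List.sorted coinsPerCashier (fun x => x) true
  decide ((PySem.List.slice sortedDesc none (some r)).sum ≥ b)

-- the while loop, totalised by a fuel that bounds its iteration count (the gap
-- right-left shrinks every pass, so (right-left).toNat passes always suffice);
-- the loop still exits through its own gap test, never through the fuel
def loopA (cashiers : List (Int × Int × Int)) (r b : Int) : Nat → Int → Int → Int
  | 0, _left, right => right
  | Nat.succ fuel, left, right =>
    if right - left > 1 then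
      let m := PySem.Int.floordiv (right + left) 2
      if evalCashiersA cashiers m r b then loopA cashiers r b fuel left m
      else loopA cashiers r b fuel m right
    else right

def solve (inp : Int × Int × Int × (List (Int × Int × Int))) : String :=
  let (r, b, _c, cashiers) := inp
  PySem.Int.toStr (loopA cashiers r b ((2000000000000000000 : Int) - 0).toNat 0 2000000000000000000)

-- ===== PORT B =====

-- the inner while loop scans past the elements ≤ x and splices x in there
def insAsc (x : Int) : List Int → List Int
  | [] => [x]
  | y :: ys => if y ≤ x then y :: insAsc x ys else x :: y :: ys

def feasibleB (cashiers : List (Int × Int × Int)) (t r b : Int) : Bool :=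
  let best := cashiers.foldl (fun best c =>
    let (m, s, p) := c
    let made := if t < p then 0
                else if p + s * m ≤ t then m
                else PySem.Int.floordiv (t - p) s
    if (best.length : Int) < r then insAsc made best
    else if r ≠ 0 ∧ made > best.headI then insAsc made best.tail
    else best) []
  -- best.headI is exact: under Pre_ (0 ≤ r) that branch runs only with best.length = r ≠ 0
  decide (best.sum ≥ b)

-- the recursion bisect(lo, hi), totalised by a fuel that bounds its depth (the gap
-- halves every call); the recursion still exits through its own gap test, never the fuel
def bisectGo (cashiers : List (Int × Int × Int)) (r b : Int) : Nat → Int → Int → Int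
  | 0, _lo, hi => hi
  | Nat.succ fuel, lo, hi =>
    if hi - lo ≤ 1 then hi
    else
      let mid := PySem.Int.floordiv (lo + hi) 2
      if feasibleB cashiers mid r b then bisectGo cashiers r b fuel lo mid
      else bisectGo cashiers r b fuel mid hi

def solve_alt (inp : Int × Int × Int × (List (Int × Int × Int))) : String :=
  let (r, b, _c, cashiers) := inp
  PySem.Int.toStr (bisectGo cashiers r b (2000000000000000000 : Int).toNat 0 2000000000000000000)

-- ===== PRECONDITION & SPEC =====
-- Pre_ excludes negative r with a nonempty cashier list: a negative number of usable
-- cashiers is outside the task's natural domain; there B's top-r buffer raises IndexError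
-- (best[0] on an empty buffer), while A's [:r] slice still returns a value (it sums all
-- but the |r| largest coin counts).
def Pre_solve (inp : Int × Int × Int × (List (Int × Int × Int))) : Prop :=
  0 ≤ inp.1 ∨ inp.2.2.2 = []
instance (inp : Int × Int × Int × (List (Int × Int × Int))) : Decidable (Pre_solve inp) := by unfold Pre_solve; infer_instance
def pvWitness_solve : (Int × Int × Int × (List (Int × Int × Int))) := (1, 1, 0, [(1, 1, 1)])

def Spec_solve (inp : Int × Int × Int × (List (Int × Int × Int))) (out : String) : Prop := out = solve_alt inp
instance (inp : Int × Int × Int × (List (Int × Int × Int))) (out : String) : Decidable (Spec_solve inp out) := by unfold Spec_solve; infer_instance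

-- ===== CLAIM (what is proved, stated in full; the proofs are below) =====
def Claim_equal_solve : Prop := ∀ (inp : Int × Int × Int × (List (Int × Int × Int))), Dom_solve inp → Pre_solve inp → Spec_solve inp (solve inp)

-- ===== LEMMAS AND PROOFS =====

theorem insAsc_cons (x y : Int) (ys : List Int) :
    insAsc x (y :: ys) = if x < y then x :: y :: ys else y :: insAsc x ys := by
  by_cases h : y ≤ x
  · have h2 : ¬ x < y := by omega
    simp [insAsc, h, h2]
  · have h2 : x < y := by omega
    simp [insAsc, h, h2]

theorem length_insAsc (x : Int) (L : List Int) : (insAsc x L).length = L.length + 1 := by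
  induction L with
  | nil => rfl
  | cons y ys ih => rw [insAsc_cons]; split <;> simp [ih]

theorem perm_insAsc (x : Int) (L : List Int) : (insAsc x L).Perm (x :: L) := by
  induction L with
  | nil => rfl
  | cons y ys ih =>
    rw [insAsc_cons]; split
    · rfl
    · exact (ih.cons y).trans (List.Perm.swap x y ys)

theorem insAsc_eq_cons (x : Int) (L : List Int) (h : ∀ a ∈ L, x < a) : insAsc x L = x :: L := by
  cases L with
  | nil => rfl
  | cons y ys => rw [insAsc_cons]; simp [h y (by simp)]

theorem pairwise_insAsc (x : Int) (L : List Int) (h : L.Pairwise (· ≤ ·)) :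
    (insAsc x L).Pairwise (· ≤ ·) := by
  induction L with
  | nil => simp [insAsc]
  | cons y ys ih =>
    rw [insAsc_cons]
    rcases List.pairwise_cons.mp h with ⟨hy, hys⟩
    split
    · rename_i hxy
      refine List.pairwise_cons.mpr ⟨?_, h⟩
      intro a ha
      rcases List.mem_cons.mp ha with rfl | ha
      · exact le_of_lt hxy
      · exact le_trans (le_of_lt hxy) (hy a ha)
    · rename_i hxy
      refine List.pairwise_cons.mpr ⟨?_, ih hys⟩
      intro a ha
      have := (perm_insAsc x ys).mem_iff.mp ha
      rcases List.mem_cons.mp this with rfl | ha'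
      · omega
      · exact hy a ha'

-- the proof-side name for a selection step that keeps exactly the k largest, phrased
-- as "insert, then drop the new minimum"
def stepk (k : Int) (buf : List Int) (x : Int) : List Int :=
  if (buf.length : Int) = k then
    if k = 0 ∨ x ≤ buf.headI then buf
    else (insAsc x buf).tail
  else insAsc x buf

-- B's fold step under its proof-side name
def stepB (r : Int) (best : List Int) (x : Int) : List Int :=
  if (best.length : Int) < r then insAsc x best
  else if r ≠ 0 ∧ x > best.headI then insAsc x best.tail
  else best

def isort (xs : List Int) : List Int := xs.foldl (fun acc x => insAsc x acc) []

theorem isort_append (xs : List Int) (x : Int) : isort (xs ++ [x]) = insAsc x (isort xs) := by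
  simp [isort, List.foldl_append]

theorem perm_isort (xs : List Int) : (isort xs).Perm xs := by
  induction xs using List.reverseRecOn with
  | nil => rfl
  | append_singleton xs x ih =>
    rw [isort_append]
    exact ((perm_insAsc x (isort xs)).trans (ih.cons x)).trans
      (List.perm_append_singleton x xs).symm

theorem length_isort (xs : List Int) : (isort xs).length = xs.length :=
  (perm_isort xs).length_eq

theorem pairwise_isort (xs : List Int) : (isort xs).Pairwise (· ≤ ·) := by
  induction xs using List.reverseRecOn with
  | nil => simp [isort]
  | append_singleton xs x ih => rw [isort_append]; exact pairwise_insAsc x _ ih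

-- key step: inserting into the truncated sorted buffer then dropping the head
-- equals inserting into the full sorted list and dropping one element more
theorem insAsc_drop (x : Int) (L : List Int) (h : L.Pairwise (· ≤ ·)) (j : Nat) :
    (insAsc x (L.drop j)).tail = (insAsc x L).drop (j + 1) := by
  induction L generalizing j with
  | nil => simp [insAsc]
  | cons y ys ih =>
    rcases List.pairwise_cons.mp h with ⟨hy, hys⟩
    cases j with
    | zero => simp [List.drop_one]
    | succ j =>
      have lhs : (y :: ys).drop (j + 1) = ys.drop j := rfl
      rw [lhs, ih hys j]
      rw [insAsc_cons]
      split
      · rename_i hxy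
        have : insAsc x ys = x :: ys :=
          insAsc_eq_cons x ys (fun a ha => lt_of_lt_of_le hxy (hy a ha))
        rw [this]
        simp
      · simp

theorem insAsc_cons_of_le (y : Int) (ys : List Int) (hs : ys.Pairwise (· ≤ ·))
    (h : ∀ a ∈ ys, y ≤ a) : insAsc y ys = y :: ys := by
  refine List.Perm.eq_of_pairwise (fun a b _ _ hab hba => ?_)
    (pairwise_insAsc y ys hs) (List.pairwise_cons.mpr ⟨h, hs⟩) (perm_insAsc y ys)
  omega

-- inserting an element no larger than the buffer minimum, then dropping one more,
-- leaves the buffer unchanged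
theorem insert_drop_of_le (x : Int) (L : List Int) (h : L.Pairwise (· ≤ ·)) (j : Nat)
    (hj : j < L.length) (hx : x ≤ (L.drop j).headI) :
    (insAsc x L).drop (j + 1) = L.drop j := by
  induction L generalizing j with
  | nil => simp at hj
  | cons y ys ih =>
    rcases List.pairwise_cons.mp h with ⟨hy, hys⟩
    cases j with
    | zero =>
      simp only [List.drop_zero, List.headI_cons] at hx ⊢
      rw [insAsc_cons]
      by_cases hxy : x < y
      · simp [hxy]
      · have hxe : x = y := by omega
        subst hxe
        rw [if_neg hxy, List.drop_one, List.tail_cons, insAsc_cons_of_le x ys hys hy]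
    | succ j =>
      have hj' : j < ys.length := by simpa using hj
      have hx' : x ≤ (ys.drop j).headI := hx
      simp only [List.drop_succ_cons]
      rw [insAsc_cons]
      by_cases hxy : x < y
      · simp only [hxy, if_true]
        show ((y :: ys).drop (j + 1)) = ys.drop j
        rfl
      · simp only [hxy, if_false]
        show ((insAsc x ys).drop (j + 1)) = ys.drop j
        exact ih hys j hj' hx'

-- streaming with the drop-the-minimum step keeps exactly the k largest so far
theorem stream_eq (k : Int) (hk : 0 ≤ k) (xs : List Int) :
    xs.foldl (stepk k) [] = (isort xs).drop (xs.length - k.toNat) := by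
  induction xs using List.reverseRecOn with
  | nil => simp [isort]
  | append_singleton xs x ih =>
    rw [List.foldl_append, List.foldl_cons, List.foldl_nil, ih, isort_append]
    set L := isort xs with hL
    have hlen : L.length = xs.length := length_isort xs
    have hsort : L.Pairwise (· ≤ ·) := pairwise_isort xs
    set K := k.toNat with hK
    have hkK : k = (K : Int) := by omega
    have hdlen : (L.drop (xs.length - K)).length = xs.length - (xs.length - K) := by
      rw [List.length_drop, hlen]
    simp only [stepk, List.length_append, List.length_cons, List.length_nil]
    have hgoalidx : xs.length + (0 + 1) - K = xs.length + 1 - K := by omega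
    rw [hgoalidx]
    by_cases hcase : K ≤ xs.length
    · have hfull : ((L.drop (xs.length - K)).length : Int) = k := by
        rw [hdlen, hkK]; omega
      rw [if_pos hfull]
      by_cases hK0 : K = 0
      · rw [if_pos (Or.inl (by omega))]
        have e1 : List.drop (xs.length - K) L = [] :=
          List.drop_eq_nil_of_le (by omega)
        have e2 : List.drop (xs.length + 1 - K) (insAsc x L) = [] :=
          List.drop_eq_nil_of_le (by have := length_insAsc x L; omega)
        rw [e1, e2]
      · by_cases hmin : x ≤ (L.drop (xs.length - K)).headI
        · rw [if_pos (Or.inr hmin)]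
          have harr : xs.length + 1 - K = (xs.length - K) + 1 := by omega
          rw [harr]
          exact (insert_drop_of_le x L hsort (xs.length - K) (by omega) hmin).symm
        · rw [if_neg (by simp only [not_or]; exact ⟨by omega, hmin⟩)]
          have harr : xs.length + 1 - K = (xs.length - K) + 1 := by omega
          rw [harr]
          exact insAsc_drop x L hsort (xs.length - K)
    · have hnotfull : ¬ ((L.drop (xs.length - K)).length : Int) = k := by
        rw [hdlen, hkK]; omega
      rw [if_neg hnotfull]
      have h1 : xs.length - K = 0 := by omega
      have h2 : xs.length + 1 - K = 0 := by omega
      simp [h1, h2]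

-- B's step is the drop-the-minimum step whenever the buffer has not outgrown r
theorem stepB_eq_stepk (r : Int) (best : List Int)
    (hlen : (best.length : Int) ≤ r) (x : Int) : stepB r best x = stepk r best x := by
  unfold stepB stepk
  by_cases hfull : (best.length : Int) = r
  · have hnl : ¬ ((best.length : Int) < r) := by omega
    rw [if_neg hnl, if_pos hfull]
    by_cases hr0 : r = 0
    · have h1 : ¬ (r ≠ 0 ∧ x > best.headI) := fun h => h.1 hr0
      rw [if_neg h1, if_pos (Or.inl hr0)]
    · by_cases hle : x ≤ best.headI
      · have h1 : ¬ (r ≠ 0 ∧ x > best.headI) := fun h => absurd hle (by omega)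
        rw [if_neg h1, if_pos (Or.inr hle)]
      · have h1 : r ≠ 0 ∧ x > best.headI := ⟨hr0, by omega⟩
        have h2 : ¬ (r = 0 ∨ x ≤ best.headI) := by rintro (h | h) <;> omega
        rw [if_pos h1, if_neg h2]
        -- best is nonempty here (length = r ≠ 0) and x exceeds its head
        cases best with
        | nil => exfalso; simp at hfull; omega
        | cons h t =>
          have hhx : h ≤ x := by simp at hle; omega
          rw [List.tail_cons]
          simp [insAsc, hhx]
  · have hlt : (best.length : Int) < r := by omega
    rw [if_pos hlt, if_neg hfull]

theorem length_stepk_le (r : Int) (hr : 0 ≤ r) (best : List Int)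
    (hlen : (best.length : Int) ≤ r) (x : Int) : ((stepk r best x).length : Int) ≤ r := by
  unfold stepk
  by_cases hfull : (best.length : Int) = r
  · rw [if_pos hfull]
    split
    · omega
    · have h1 : ((insAsc x best).tail.length) = best.length := by
        rw [List.length_tail, length_insAsc]
        omega
      omega
  · rw [if_neg hfull]
    have := length_insAsc x best
    omega

-- naming the sorted order: Python's sorted(..., reverse=True) is the reverse of isort
theorem sortedDesc_eq (xs : List Int) :
    PySem.List.sorted xs (fun x => x) true = (isort xs).reverse := by
  have h1 : (PySem.List.sorted xs (fun x => x) true).reverse = isort xs := by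
    apply List.Perm.eq_of_pairwise (le := (· ≤ ·))
    · intro a b _ _ hab hba; omega
    · rw [List.pairwise_reverse]
      exact PySem.List.sorted_pairwise_rev xs (fun x => x)
    · exact pairwise_isort xs
    · exact ((PySem.List.sorted xs (fun x => x) true).reverse_perm.trans
        (PySem.List.sorted_perm xs (fun x => x) true)).trans (perm_isort xs).symm
  calc PySem.List.sorted xs (fun x => x) true
      = (PySem.List.sorted xs (fun x => x) true).reverse.reverse := by rw [List.reverse_reverse]
    _ = (isort xs).reverse := by rw [h1]

theorem sum_take_reverse (M : List Int) (T : Nat) :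
    (M.reverse.take T).sum = (M.drop (M.length - T)).sum := by
  rw [List.take_reverse, List.sum_reverse]

-- B's inlined coin computation is A's coins
-- B's inline fold over the cashiers is the drop-the-minimum stream over the coin counts
theorem foldB_eq (t r : Int) (hr : 0 ≤ r) :
    ∀ (cashiers : List (Int × Int × Int)) (acc : List Int), (acc.length : Int) ≤ r →
      cashiers.foldl (fun best c =>
        let (m, s, p) := c
        let made := if t < p then 0
                    else if p + s * m ≤ t then m
                    else PySem.Int.floordiv (t - p) s
        if (best.length : Int) < r then insAsc made best
        else if r ≠ 0 ∧ made > best.headI then insAsc made best.tail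
        else best) acc
      = (cashiers.map (fun ca => coinsA ca t)).foldl (stepk r) acc := by
  intro cashiers
  induction cashiers with
  | nil => intro acc _; rfl
  | cons c cs ih =>
    intro acc hacc
    obtain ⟨m, s, p⟩ := c
    rw [List.map_cons, List.foldl_cons, List.foldl_cons]
    refine Eq.trans ?_ (ih (stepk r acc (coinsA (m, s, p) t)) (length_stepk_le r hr acc hacc _))
    congr 1
    exact stepB_eq_stepk r acc hacc (coinsA (m, s, p) t)

-- A's slice-of-sort sum equals B's buffer sum (for a nonnegative r)
theorem eval_eq (cashiers : List (Int × Int × Int)) (t r b : Int) (hr : 0 ≤ r) :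
    evalCashiersA cashiers t r b = feasibleB cashiers t r b := by
  simp only [evalCashiersA, feasibleB]
  rw [foldB_eq t r hr cashiers [] (by simpa using hr)]
  rw [stream_eq r hr]
  rw [sortedDesc_eq, PySem.List.slice_to _ hr, sum_take_reverse, length_isort]

-- with a trivial probe (no cashiers) both checks are "0 ≥ b", for every r
theorem eval_eq_nil (t r b : Int) :
    evalCashiersA [] t r b = feasibleB [] t r b := by
  simp [evalCashiersA, feasibleB, PySem.List.sorted, PySem.List.slice]

-- the fueled while loop and the fueled recursion take the same branches at every depth
theorem loop_eq (cashiers : List (Int × Int × Int)) (r b : Int)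
    (heval : ∀ t, evalCashiersA cashiers t r b = feasibleB cashiers t r b) :
    ∀ (fuel : Nat) (lo hi : Int),
      loopA cashiers r b fuel lo hi = bisectGo cashiers r b fuel lo hi := by
  intro fuel
  induction fuel with
  | zero => intro lo hi; rfl
  | succ fuel ih =>
    intro lo hi
    rw [loopA, bisectGo]
    have hcomm : PySem.Int.floordiv (hi + lo) 2 = PySem.Int.floordiv (lo + hi) 2 := by
      rw [Int.add_comm]
    by_cases hbig : hi - lo > 1
    · rw [if_pos hbig, if_neg (show ¬ hi - lo ≤ 1 by omega)]
      simp only [hcomm, heval, ih]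
    · rw [if_neg hbig, if_pos (show hi - lo ≤ 1 by omega)]

-- ===== VERDICT (by name: the statement is the Claim_ definition above) =====
theorem solve_spec : Claim_equal_solve := by
  intro inp _ hpre
  obtain ⟨r, b, c, cashiers⟩ := inp
  unfold Spec_solve solve solve_alt
  have heval : ∀ t, evalCashiersA cashiers t r b = feasibleB cashiers t r b := by
    rcases hpre with hr | hnil
    · exact fun t => eval_eq cashiers t r b hr
    · simp only at hnil
      subst hnil
      exact fun t => eval_eq_nil t r b
  show PySem.Int.toStr
        (loopA cashiers r b ((2000000000000000000 : Int) - 0).toNat 0 2000000000000000000)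
      = PySem.Int.toStr
        (bisectGo cashiers r b (2000000000000000000 : Int).toNat 0 2000000000000000000)
  have hfuel : ((2000000000000000000 : Int) - 0).toNat = ((2000000000000000000 : Int)).toNat := by
    norm_num
  rw [hfuel, loop_eq cashiers r b heval]
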